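-- pv_equiv track=rewrite | github.com/AskSid/disentangling-computation-from-cot | probe_viz/constants.py | cycle_palette
-- ===== SOURCE A (Python) =====
-- from typing import Dict, List
--
-- COLOR_PALETTES: List[List[str]] = [
--     ["#4E79A7", "#F28E2B", "#E15759", "#76B7B2", "#59A14F", "#EDC948"],
--     ["#AF7AA1", "#FF9DA7", "#9C755F", "#BAB0AC"],
-- ]
--
-- def cycle_palette(num_classes: int) -> List[str]:
--     """Produce a list of colors of length ``num_classes``."""
--     colors: List[str] = []
--     palette_idx = 0
--     while len(colors) < num_classes:
--         palette = COLOR_PALETTES[palette_idx % len(COLOR_PALETTES)]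
--         for color in palette:
--             colors.append(color)
--             if len(colors) == num_classes:
--                 break
--         palette_idx += 1
--     return colors
-- ===== SOURCE B (Python) =====
-- from typing import List
--
-- COLOR_PALETTES: List[List[str]] = [
--     ["#4E79A7", "#F28E2B", "#E15759", "#76B7B2", "#59A14F", "#EDC948"],
--     ["#AF7AA1", "#FF9DA7", "#9C755F", "#BAB0AC"],
-- ]
--
-- def cycle_palette(num_classes: int) -> List[str]:
--     """Produce a list of colors of length ``num_classes``."""
--     flat = [color for palette in COLOR_PALETTES for color in palette]
--     return [flat[i % len(flat)] for i in range(num_classes)]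
-- ===== Notes on version B (the rewrite author's own statement) =====
-- stated objective: simpler
-- what changed: Replaces A's nested while/for loop with an early break by flattening the palettes once and building the result with a single modular-indexed comprehension over range(num_classes).
import Mathlib
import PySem

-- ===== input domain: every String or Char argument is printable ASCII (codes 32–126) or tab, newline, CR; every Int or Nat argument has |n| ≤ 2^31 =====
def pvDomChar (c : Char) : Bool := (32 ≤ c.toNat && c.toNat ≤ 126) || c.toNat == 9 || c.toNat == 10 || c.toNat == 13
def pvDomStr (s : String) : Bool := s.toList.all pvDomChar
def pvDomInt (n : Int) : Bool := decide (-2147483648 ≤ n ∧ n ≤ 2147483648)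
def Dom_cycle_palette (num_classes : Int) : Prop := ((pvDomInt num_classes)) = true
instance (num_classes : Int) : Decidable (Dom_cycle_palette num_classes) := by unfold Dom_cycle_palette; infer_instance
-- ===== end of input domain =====

-- B replaces A's nested while/for loop (with an early break) by one modular-indexed
-- pass over a flattened palette table; objective: simpler (same asymptotic cost).

-- ===== PORT A =====
def pvP0 : List String := ["#4E79A7", "#F28E2B", "#E15759", "#76B7B2", "#59A14F", "#EDC948"]
def pvP1 : List String := ["#AF7AA1", "#FF9DA7", "#9C755F", "#BAB0AC"]
-- COLOR_PALETTES (shared module constant)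
def pvPalettes : List (List String) := [pvP0, pvP1]

-- A's inner `for color in palette: append; if len == num: break`
def pvInner (num_classes : Int) (colors : List String) (palette : List String) : List String :=
  match palette with
  | [] => colors
  | c :: rest =>
    let colors' := colors ++ [c]
    if (colors'.length : Int) = num_classes then colors' else pvInner num_classes colors' rest

-- termination helper for the while loop below (cited by pvLoop's decreasing_by)
theorem pvInner_len_le (n : Int) : ∀ (p colors : List String),
    colors.length ≤ (pvInner n colors p).length := by
  intro p
  induction p with
  | nil => intro colors; simp [pvInner]
  | cons c rest ih =>
    intro colors
    simp only [pvInner]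
    split
    · simp
    · exact le_trans (by simp) (ih (colors ++ [c]))

theorem pvInner_len_lt (n : Int) (colors : List String) (c : String) (rest : List String) :
    colors.length < (pvInner n colors (c :: rest)).length := by
  have h := pvInner_len_le n rest (colors ++ [c])
  simp only [pvInner]
  split
  · simp
  · simp at h; omega

theorem pvPal_getD_ne_nil (i : Int) :
    PySem.List.pyGetD pvPalettes (PySem.Int.mod i (pvPalettes.length : Int)) [] ≠ [] := by
  have hb : (pvPalettes.length : Int) = 2 := by norm_num [pvPalettes]
  rw [hb]
  have h0 : (0:Int) ≤ PySem.Int.mod i 2 := PySem.Int.mod_nonneg i (by norm_num)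
  have h1 : PySem.Int.mod i 2 < 2 := PySem.Int.mod_lt i (by norm_num)
  have : PySem.Int.mod i 2 = 0 ∨ PySem.Int.mod i 2 = 1 := by omega
  rcases this with h | h <;> rw [h] <;> decide

-- A's outer `while len(colors) < num_classes`
def pvLoop (num_classes : Int) (colors : List String) (palette_idx : Int) : List String :=
  if h : (colors.length : Int) < num_classes then
    pvLoop num_classes
      (pvInner num_classes colors
        (PySem.List.pyGetD pvPalettes (PySem.Int.mod palette_idx (pvPalettes.length : Int)) []))
      (palette_idx + 1)
  else colors
termination_by (num_classes - colors.length).toNat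
decreasing_by
  have hne := pvPal_getD_ne_nil palette_idx
  cases hpal : PySem.List.pyGetD pvPalettes (PySem.Int.mod palette_idx (pvPalettes.length : Int)) [] with
  | nil => exact absurd hpal hne
  | cons c rest =>
    have := pvInner_len_lt num_classes colors c rest
    omega

def cycle_palette (num_classes : Int) : List String := pvLoop num_classes [] 0

-- ===== PORT B =====
-- flat[i % len(flat)] never raises (0 ≤ i % 10 < 10), so pyGetD is exact here
def cycle_palette_alt (num_classes : Int) : List String :=
  let flat := pvPalettes.flatMap (fun palette => palette)
  (PySem.List.pyRange 0 num_classes 1).map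
    (fun i => PySem.List.pyGetD flat (PySem.Int.mod i (flat.length : Int)) "")

-- ===== PRECONDITION & SPEC =====
def Spec_cycle_palette (num_classes : Int) (out : List String) : Prop := out = cycle_palette_alt num_classes
instance (num_classes : Int) (out : List String) : Decidable (Spec_cycle_palette num_classes out) := by unfold Spec_cycle_palette; infer_instance

-- ===== CLAIM (what is proved, stated in full; the proofs are below) =====
def Claim_equal_cycle_palette : Prop := ∀ (num_classes : Int), Dom_cycle_palette num_classes → Spec_cycle_palette num_classes (cycle_palette num_classes)

-- ===== LEMMAS AND PROOFS =====

-- the flattened table and the canonical "first k colors of the cycle"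
def pvFlat : List String := pvP0 ++ pvP1
def pvG (k : Nat) : List String := (List.range k).map (fun i => pvFlat.getD (i % 10) "")
-- total number of colors appended after j complete palettes
def pvStart (j : Nat) : Nat := 10 * (j / 2) + 6 * (j % 2)

theorem pvG_len (k : Nat) : (pvG k).length = k := by simp [pvG]

theorem pvG_succ (k : Nat) : pvG (k + 1) = pvG k ++ [pvFlat.getD (k % 10) ""] := by
  simp [pvG, List.range_succ]

theorem pv_alt_eq (n : Int) : cycle_palette_alt n = pvG n.toNat := by
  unfold cycle_palette_alt
  rw [PySem.List.pyRange_one]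
  simp only [List.map_map, Int.sub_zero]
  unfold pvG
  apply List.map_congr_left
  intro k _
  simp only [Function.comp_apply]
  have h1 : (0 : Int) + (k : Int) = ((k : Nat) : Int) := by omega
  rw [h1]
  have hlen : ((pvPalettes.flatMap (fun palette => palette)).length : Int) = ((10 : Nat) : Int) := by decide
  rw [hlen, PySem.Int.mod_natCast, PySem.List.pyGetD_natCast]
  rfl

theorem pvInner_g (n : Int) : ∀ (pal : List String) (m : Nat), (m : Int) < n →
    (∀ t, t < pal.length → pal.getD t "" = pvFlat.getD ((m + t) % 10) "") →
    pvInner n (pvG m) pal = pvG (min n.toNat (m + pal.length)) := by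
  intro pal
  induction pal with
  | nil =>
    intro m hm _
    simp only [pvInner, List.length_nil, Nat.add_zero]
    congr 1
    omega
  | cons c rest ih =>
    intro m hm hp
    have hc : c = pvFlat.getD (m % 10) "" := by
      have := hp 0 (by simp)
      simpa using this
    have hg : pvG m ++ [c] = pvG (m + 1) := by rw [pvG_succ, hc]
    have hlen : (pvG m ++ [c]).length = m + 1 := by simp [pvG_len]
    simp only [pvInner]
    by_cases heq : ((pvG m ++ [c]).length : Int) = n
    · rw [if_pos heq, hg]
      rw [hlen] at heq
      congr 1
      simp only [List.length_cons]
      omega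
    · rw [if_neg heq, hg]
      rw [hlen] at heq
      have hm1 : ((m + 1 : Nat) : Int) < n := by push_cast at heq ⊢; omega
      have hstep := ih (m + 1) hm1 (fun t ht => by
        have h2 := hp (t + 1) (by simpa using Nat.succ_lt_succ ht)
        simp only [List.getD_cons_succ] at h2
        rw [h2]
        congr 2
        omega)
      rw [hstep]
      congr 1
      simp only [List.length_cons]
      omega

-- the palette A picks at index j, as a segment of the cycle
theorem pvPal_spec (j : Nat) :
    PySem.List.pyGetD pvPalettes (PySem.Int.mod (j : Int) (pvPalettes.length : Int)) [] =
      pvPalettes.getD (j % 2) [] := by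
  have h2 : ((pvPalettes.length : Nat) : Int) = ((2 : Nat) : Int) := by decide
  rw [h2, PySem.Int.mod_natCast, PySem.List.pyGetD_natCast]

theorem pvLoop_g_aux (n : Int) : ∀ (fuel j : Nat), n.toNat - pvStart j ≤ fuel →
    ((pvStart j : Int) ≤ n ∨ j = 0) →
    pvLoop n (pvG (pvStart j)) (j : Int) = pvG n.toNat := by
  intro fuel
  induction fuel with
  | zero =>
    intro j hf h
    rw [pvLoop]
    rw [dif_neg (by rw [pvG_len]; omega)]
    congr 1
    have hs0 : pvStart 0 = 0 := rfl
    rcases h with h | h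
    · omega
    · subst h; omega
  | succ fuel ih =>
    intro j hf h
    rw [pvLoop]
    by_cases hguard : (((pvG (pvStart j)).length : Nat) : Int) < n
    · rw [dif_pos hguard]
      rw [pvG_len] at hguard
      -- the palette picked this round
      rw [pvPal_spec]
      have hmod : j % 2 = 0 ∨ j % 2 = 1 := by omega
      have hinner : pvInner n (pvG (pvStart j)) (pvPalettes.getD (j % 2) []) =
          pvG (min n.toNat (pvStart (j + 1))) := by
        rcases hmod with hm | hm
        · rw [hm]
          have hseg : ∀ t, t < (pvPalettes.getD 0 []).length →
              (pvPalettes.getD 0 []).getD t "" = pvFlat.getD ((pvStart j + t) % 10) "" := by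
            intro t ht
            have hL : (pvPalettes.getD 0 []).length = 6 := rfl
            rw [hL] at ht
            have hmod10 : (pvStart j + t) % 10 = t := by
              unfold pvStart; rw [hm]; omega
            rw [hmod10]
            interval_cases t <;> rfl
          rw [pvInner_g n _ _ hguard hseg]
          congr 1
          have : (pvPalettes.getD 0 []).length = 6 := by rfl
          rw [this]
          unfold pvStart
          rw [hm]
          omega
        · rw [hm]
          have hseg : ∀ t, t < (pvPalettes.getD 1 []).length →
              (pvPalettes.getD 1 []).getD t "" = pvFlat.getD ((pvStart j + t) % 10) "" := by
            intro t ht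
            have hL : (pvPalettes.getD 1 []).length = 4 := rfl
            rw [hL] at ht
            have hmod10 : (pvStart j + t) % 10 = 6 + t := by
              unfold pvStart; rw [hm]; omega
            rw [hmod10]
            interval_cases t <;> rfl
          rw [pvInner_g n _ _ hguard hseg]
          congr 1
          have : (pvPalettes.getD 1 []).length = 4 := by rfl
          rw [this]
          unfold pvStart
          rw [hm]
          omega
      rw [hinner]
      have hstartlt : pvStart j < pvStart (j + 1) := by unfold pvStart; omega
      by_cases hfin : n.toNat ≤ pvStart (j + 1)
      · have hmin : min n.toNat (pvStart (j + 1)) = n.toNat := by omega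
        rw [hmin, pvLoop]
        rw [dif_neg (by rw [pvG_len]; omega)]
      · have hmin : min n.toNat (pvStart (j + 1)) = pvStart (j + 1) := by omega
        rw [hmin]
        have hcast : ((j : Int) + 1) = ((j + 1 : Nat) : Int) := by push_cast; ring
        rw [hcast]
        exact ih (j + 1) (by omega) (Or.inl (by omega))
    · rw [dif_neg hguard]
      rw [pvG_len] at hguard
      congr 1
      have hs0 : pvStart 0 = 0 := rfl
      rcases h with h | h
      · omega
      · subst h; omega

theorem pv_a_eq (n : Int) : cycle_palette n = pvG n.toNat := by
  unfold cycle_palette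
  have h0 : ([] : List String) = pvG (pvStart 0) := by rfl
  have h1 : (0 : Int) = ((0 : Nat) : Int) := by rfl
  rw [h0, h1]
  exact pvLoop_g_aux n (n.toNat - pvStart 0) 0 le_rfl (Or.inr rfl)

-- ===== VERDICT (by name: the statement is the Claim_ definition above) =====
theorem cycle_palette_spec : Claim_equal_cycle_palette := by
  intro n _
  unfold Spec_cycle_palette
  rw [pv_a_eq, pv_alt_eq]
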